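-- pv_equiv track=rewrite | github.com/xSardine/anisongdb-mod-tool | src/admin_ui/utils.py | populate_url_with_args
-- ===== SOURCE A (Python) =====
-- def populate_url_with_args(url, args):
--     is_first_arg = True
--     for key, value in args.items():
--         if value:
--             if is_first_arg:
--                 url += f"?{key}={value}"
--                 is_first_arg = False
--             else:
--                 url += f"&{key}={value}"
--     return url
-- ===== SOURCE B (Python) =====
-- def populate_url_with_args(url, args):
--     # assemble the query string back-to-front: the separator decision looks at
--     # the already-built tail, not at carried first-arg state
--     q = ""
--     for key, value in reversed(list(args.items())):
--         if value:
--             q = f"{key}={value}&{q}" if q else f"{key}={value}"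
--     return f"{url}?{q}" if q else url
-- ===== Notes on version B (the rewrite author's own statement) =====
-- stated objective: alternative
-- what changed: Replaces A's single forward pass with a carried is_first_arg flag and incremental left-to-right concatenation by a reverse fold that assembles the query string back-to-front (the separator decision depends on the already-built tail, not on carried flag state), then prepends '?' once if the result is non-empty.
import Mathlib
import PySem

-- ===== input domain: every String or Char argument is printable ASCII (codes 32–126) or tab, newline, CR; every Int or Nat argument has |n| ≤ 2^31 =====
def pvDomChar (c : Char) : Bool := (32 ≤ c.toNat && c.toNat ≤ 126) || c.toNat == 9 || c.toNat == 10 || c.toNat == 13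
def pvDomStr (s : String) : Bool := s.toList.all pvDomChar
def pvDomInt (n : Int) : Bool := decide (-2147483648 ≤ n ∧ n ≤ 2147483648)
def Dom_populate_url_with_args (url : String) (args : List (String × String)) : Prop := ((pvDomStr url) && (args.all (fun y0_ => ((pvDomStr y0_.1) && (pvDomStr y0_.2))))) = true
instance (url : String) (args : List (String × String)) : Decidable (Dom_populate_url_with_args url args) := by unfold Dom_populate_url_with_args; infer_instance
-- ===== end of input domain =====

-- B replaces A's forward pass with a carried first-arg flag by a back-to-front
-- reverse fold (accumulator, no flag) building the query string (objective: alternative);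
-- return values are identical.

-- ===== PORT A =====
-- the loop over args.items() with the carried is_first_arg flag
def populateA_loop (url : String) (is_first_arg : Bool) (args : List (String × String)) : String :=
  match args with
  | [] => url
  | (key, value) :: rest =>
    if value ≠ "" then
      if is_first_arg then
        populateA_loop (url ++ "?" ++ key ++ "=" ++ value) false rest
      else
        populateA_loop (url ++ "&" ++ key ++ "=" ++ value) false rest
    else
      populateA_loop url is_first_arg rest

def populate_url_with_args (url : String) (args : List (String × String)) : String :=
  populateA_loop url true args

-- ===== PORT B =====
-- Source B's reverse loop with accumulator q = a right fold over the items
def populateB_query (items : List (String × String)) : String :=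
  items.foldr (fun kv q =>
    if kv.2 = "" then q
    else if q ≠ "" then kv.1 ++ "=" ++ kv.2 ++ "&" ++ q
    else kv.1 ++ "=" ++ kv.2) ""

def populate_url_with_args_alt (url : String) (args : List (String × String)) : String :=
  let q := populateB_query args
  if q ≠ "" then url ++ "?" ++ q else url

-- ===== PRECONDITION & SPEC =====
def Spec_populate_url_with_args (url : String) (args : List (String × String)) (out : String) : Prop := out = populate_url_with_args_alt url args
instance (url : String) (args : List (String × String)) (out : String) : Decidable (Spec_populate_url_with_args url args out) := by unfold Spec_populate_url_with_args; infer_instance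

-- ===== CLAIM (what is proved, stated in full; the proofs are below) =====
def Claim_equal_populate_url_with_args : Prop := ∀ (url : String) (args : List (String × String)), Dom_populate_url_with_args url args → Spec_populate_url_with_args url args (populate_url_with_args url args)

-- ===== LEMMAS AND PROOFS =====

lemma populateB_query_cons (k v : String) (rest : List (String × String)) :
    populateB_query ((k, v) :: rest)
      = if v = "" then populateB_query rest
        else if populateB_query rest ≠ "" then k ++ "=" ++ v ++ "&" ++ populateB_query rest
        else k ++ "=" ++ v := rfl


-- A's loop after the first kept fragment: appends "&" ++ query for the remaining pairs
lemma populateA_loop_false (args : List (String × String)) (url : String) :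
    (populateA_loop url false args).toList
      = url.toList ++ (if populateB_query args = "" then []
                       else '&' :: (populateB_query args).toList) := by
  induction args generalizing url with
  | nil => simp [populateA_loop, populateB_query]
  | cons kv rest ih =>
    obtain ⟨k, v⟩ := kv
    by_cases hv : v = ""
    · simp [populateA_loop, populateB_query_cons, hv, ih]
    · by_cases ht : populateB_query rest = ""
      · rw [populateB_query_cons]; simp [populateA_loop, hv, ht, ih, String.toList_append]
      · rw [populateB_query_cons]; simp [populateA_loop, hv, ht, ih, String.toList_append]

-- A's loop with the flag still set: appends "?" ++ query if any fragment is kept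
lemma populateA_loop_true (args : List (String × String)) (url : String) :
    (populateA_loop url true args).toList
      = url.toList ++ (if populateB_query args = "" then []
                       else '?' :: (populateB_query args).toList) := by
  induction args generalizing url with
  | nil => simp [populateA_loop, populateB_query]
  | cons kv rest ih =>
    obtain ⟨k, v⟩ := kv
    by_cases hv : v = ""
    · simp [populateA_loop, populateB_query_cons, hv, ih]
    · by_cases ht : populateB_query rest = ""
      · rw [populateB_query_cons]; simp [populateA_loop, hv, ht, populateA_loop_false,
              String.toList_append]
      · rw [populateB_query_cons]; simp [populateA_loop, hv, ht, populateA_loop_false,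
              String.toList_append]

-- ===== VERDICT (by name: the statement is the Claim_ definition above) =====
theorem populate_url_with_args_spec : Claim_equal_populate_url_with_args := by
  intro url args _
  unfold Spec_populate_url_with_args populate_url_with_args populate_url_with_args_alt
  apply String.toList_inj.mp
  rw [populateA_loop_true]
  by_cases h : populateB_query args = ""
  · simp [h]
  · simp [h, String.toList_append]
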